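-- pv_equiv track=rewrite | github.com/joaopedropassostocantins/AFASIA | submission.py | find_blobs
-- ===== SOURCE A (Python) =====
-- from collections import defaultdict, deque
--
-- def find_blobs(grid):
--     """Dois menores grupos de cores não-zero no grid."""
--     colors: dict = defaultdict(list)
--     for r, row in enumerate(grid):
--         for c, val in enumerate(row):
--             v = int(val)
--             if v != 0:
--                 colors[v].append((r, c))
--     if len(colors) < 2:
--         return [], []
--     ranking = sorted(colors.keys(), key=lambda k: len(colors[k]))
--     return colors[ranking[0]], colors[ranking[1]]
-- ===== SOURCE B (Python) =====
-- def find_blobs(grid):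
--     """Dois menores grupos de cores nao-zero no grid."""
--     colors = {}
--     for r, row in enumerate(grid):
--         for c, val in enumerate(row):
--             v = int(val)
--             if v != 0:
--                 colors.setdefault(v, []).append((r, c))
--     if len(colors) < 2:
--         return [], []
--     # one-pass selection of the two smallest groups (stable on ties, like
--     # Python's stable sort: an earlier-inserted key wins an equal-size tie)
--     best1 = None
--     best2 = None
--     for k in colors:
--         n = len(colors[k])
--         if best1 is None or n < len(colors[best1]):
--             best2 = best1
--             best1 = k
--         elif best2 is None or n < len(colors[best2]):
--             best2 = k
--     return colors[best1], colors[best2]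
-- ===== Notes on version B (the rewrite author's own statement) =====
-- stated objective: alternative
-- what changed: Replaces the full sort of the color keys by a single-pass selection of the two smallest groups (two running bests with stable tie-breaking), keeping the identical grouping loop and guard.
import Mathlib
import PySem

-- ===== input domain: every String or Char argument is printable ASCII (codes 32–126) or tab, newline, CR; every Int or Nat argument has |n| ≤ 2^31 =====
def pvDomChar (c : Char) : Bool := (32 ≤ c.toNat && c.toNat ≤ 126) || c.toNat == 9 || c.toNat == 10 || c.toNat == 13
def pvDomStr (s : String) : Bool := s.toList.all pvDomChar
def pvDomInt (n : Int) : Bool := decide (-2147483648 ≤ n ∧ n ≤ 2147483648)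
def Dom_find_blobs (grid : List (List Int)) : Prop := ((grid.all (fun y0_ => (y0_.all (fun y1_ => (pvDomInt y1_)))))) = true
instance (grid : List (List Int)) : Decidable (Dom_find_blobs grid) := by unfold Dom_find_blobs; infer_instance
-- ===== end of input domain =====

-- B replaces the full sort of the color keys by a one-pass selection of the two
-- smallest groups (objective: alternative — a selection scan instead of a sort).

-- ===== PORT A =====
def find_blobs (grid : List (List Int)) : (List (Int × Int)) × (List (Int × Int)) :=
  -- colors: defaultdict(list); colors[v].append((r, c)) is modify v [] (· ++ [(r, c)])
  let colors : PySem.Dict Int (List (Int × Int)) :=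
    (PySem.List.enumerate grid).foldl (fun d rrow =>
      (PySem.List.enumerate rrow.2).foldl (fun d cv =>
        if cv.2 ≠ 0 then d.modify cv.2 [] (fun l => l ++ [(rrow.1, cv.1)]) else d) d)
      PySem.Dict.empty
  if colors.size < 2 then ([], [])
  else
    let ranking := PySem.List.sorted colors.keys
      (fun k => ((colors.getD k []).length : Int)) false
    match PySem.List.pyGet? ranking 0, PySem.List.pyGet? ranking 1 with
    | some k0, some k1 => (colors.getD k0 [], colors.getD k1 [])
    | _, _ => ([], [])  -- unreachable: the guard ensures ranking has ≥ 2 elements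

-- ===== PORT B =====
-- one step of B's selection loop: update the two running bests (stable on ties)
def pvSel2 {α : Type} (before : α → α → Bool) (st : Option α × Option α) (x : α) :
    Option α × Option α :=
  match st with
  | (none, _) => (some x, none)
  | (some a, b) =>
    if before x a then (some x, some a)
    else match b with
      | none => (some a, some x)
      | some b' => if before x b' then (some a, some x) else (some a, some b')

def find_blobs_alt (grid : List (List Int)) : (List (Int × Int)) × (List (Int × Int)) :=
  -- colors.setdefault(v, []).append((r, c)): store back the looked-up list plus (r, c)
  let colors : PySem.Dict Int (List (Int × Int)) :=
    (PySem.List.enumerate grid).foldl (fun d rrow =>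
      (PySem.List.enumerate rrow.2).foldl (fun d cv =>
        if cv.2 ≠ 0 then d.insert cv.2 (d.getD cv.2 [] ++ [(rrow.1, cv.1)]) else d) d)
      PySem.Dict.empty
  if colors.size < 2 then ([], [])
  else
    let bests := colors.keys.foldl
      (pvSel2 (fun k a =>
        decide (((colors.getD k []).length : Int) < ((colors.getD a []).length : Int))))
      (none, none)
    match bests.1 with
    | none => ([], [])  -- unreachable: len(colors) ≥ 2 leaves both bests set
    | some b1 =>
      match bests.2 with
      | none => ([], [])
      | some b2 => (colors.getD b1 [], colors.getD b2 [])

-- ===== PRECONDITION & SPEC =====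
def Spec_find_blobs (grid : List (List Int)) (out : (List (Int × Int)) × (List (Int × Int))) : Prop := out = find_blobs_alt grid
instance (grid : List (List Int)) (out : (List (Int × Int)) × (List (Int × Int))) : Decidable (Spec_find_blobs grid out) := by unfold Spec_find_blobs; infer_instance

-- ===== CLAIM (what is proved, stated in full; the proofs are below) =====
def Claim_equal_find_blobs : Prop := ∀ (grid : List (List Int)), Dom_find_blobs grid → Spec_find_blobs grid (find_blobs grid)

-- ===== LEMMAS AND PROOFS =====

-- the first two elements of a list, as B's running-best state
def pvFirst2 {α : Type} (l : List α) : Option α × Option α := (l.head?, l.tail.head?)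

theorem pvFirst2_insertBy {α : Type} (before : α → α → Bool) (x : α) (l : List α) :
    pvFirst2 (PySem.List.insertBy before x l) = pvSel2 before (pvFirst2 l) x := by
  cases l with
  | nil => simp [PySem.List.insertBy, pvFirst2, pvSel2]
  | cons y ys =>
    by_cases h : before x y
    · simp [PySem.List.insertBy, pvFirst2, pvSel2, h]
    · cases ys with
      | nil => simp [PySem.List.insertBy, pvFirst2, pvSel2, h]
      | cons z zs =>
        by_cases h2 : before x z <;>
          · simp [PySem.List.insertBy, pvFirst2, pvSel2, h, h2]

theorem pvFirst2_foldl_insertBy {α : Type} (before : α → α → Bool)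
    (xs : List α) (acc : List α) :
    pvFirst2 (xs.foldl (fun acc x => PySem.List.insertBy before x acc) acc) =
      xs.foldl (pvSel2 before) (pvFirst2 acc) := by
  induction xs generalizing acc with
  | nil => rfl
  | cons x xs ih => simp only [List.foldl_cons, ih, pvFirst2_insertBy]

theorem pvFirst2_sorted {α κ : Type} [LT κ] [DecidableLT κ] (xs : List α) (key : α → κ) :
    pvFirst2 (PySem.List.sorted xs key false) =
      xs.foldl (pvSel2 (fun a b => decide (key a < key b))) (none, none) := by
  rw [PySem.List.sorted_eq_foldl_insertBy, pvFirst2_foldl_insertBy]; rfl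

-- ===== VERDICT (by name: the statement is the Claim_ definition above) =====
theorem find_blobs_spec : Claim_equal_find_blobs := by
  intro grid _
  unfold Spec_find_blobs find_blobs find_blobs_alt
  -- the two grouping loops build the same dict: modify v [] f IS insert v (f (getD v []))
  rw [show (fun (d : PySem.Dict Int (List (Int × Int))) (rrow : Int × List Int) =>
      (PySem.List.enumerate rrow.2).foldl (fun d cv =>
        if cv.2 ≠ 0 then d.insert cv.2 (d.getD cv.2 [] ++ [(rrow.1, cv.1)]) else d) d)
    = (fun (d : PySem.Dict Int (List (Int × Int))) (rrow : Int × List Int) =>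
      (PySem.List.enumerate rrow.2).foldl (fun d cv =>
        if cv.2 ≠ 0 then d.modify cv.2 [] (fun l => l ++ [(rrow.1, cv.1)]) else d) d) from rfl]
  set colors : PySem.Dict Int (List (Int × Int)) :=
    (PySem.List.enumerate grid).foldl (fun d rrow =>
      (PySem.List.enumerate rrow.2).foldl (fun d cv =>
        if cv.2 ≠ 0 then d.modify cv.2 [] (fun l => l ++ [(rrow.1, cv.1)]) else d) d)
      PySem.Dict.empty with hc
  by_cases hsz : colors.size < 2
  · simp [hsz]
  · simp only [hsz, if_false]
    have hkeys : colors.keys.length = colors.size := by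
      simp [PySem.Dict.keys, PySem.Dict.size]
    have hlen : (PySem.List.sorted colors.keys
        (fun k => ((colors.getD k []).length : Int)) false).length = colors.keys.length :=
      PySem.List.length_sorted _ _ _
    have h2 : 2 ≤ (PySem.List.sorted colors.keys
        (fun k => ((colors.getD k []).length : Int)) false).length := by
      omega
    have hf2 := pvFirst2_sorted colors.keys
      (fun k => ((colors.getD k []).length : Int))
    -- the sorted list has ≥ 2 elements, so its first two are some / some
    rcases hs : PySem.List.sorted colors.keys
        (fun k => ((colors.getD k []).length : Int)) false with _ | ⟨k0, _ | ⟨k1, rest⟩⟩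
    · rw [hs] at h2; simp at h2
    · rw [hs] at h2; simp at h2
    · rw [hs] at hf2
      simp only [pvFirst2, List.head?_cons, List.tail_cons] at hf2
      rw [← hf2]
      have hz : (0:Int) ≤ (rest.length:Int) + 1 := by positivity
      simp [PySem.List.pyGet?, PySem.List.pyIdx?, hz]
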